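-- pv_equiv track=rewrite | github.com/wattanunteeratanapong/01076109-OBJECT-ORIENTED-DATA-STRUCTURES | Lab8/Chapter10 (Search)/10.5.py | min_weight_for_boxes
-- ===== SOURCE A (Python) =====
-- def can_pack(items, max_weight, k):
--     current_weight = 0
--     boxes_used = 1
--
--     for item in items:
--         if current_weight + item > max_weight:
--             boxes_used += 1
--             current_weight = item
--             if boxes_used > k:
--                 return False
--         else:
--             current_weight += item
--
--     return True
--
-- def min_weight_for_boxes(items, k):
--     left, right = max(items), sum(items)
--
--     while left < right:
--         mid = (left + right) // 2
--         if can_pack(items, mid, k):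
--             right = mid
--         else:
--             left = mid + 1
--
--     return left
-- ===== SOURCE B (Python) =====
-- def _strip_box(xs, w):
--     """Remove the first greedily-filled box from nonempty xs: the box takes
--     xs[0] unconditionally, then extends while the running total stays <= w."""
--     total = xs[0]
--     i = 1
--     while i < len(xs) and total + xs[i] <= w:
--         total += xs[i]
--         i += 1
--     return xs[i:]
--
--
-- def _boxes_needed(items, w):
--     """How many boxes the greedy packing uses at capacity w: chop off the
--     first box until nothing is left, counting the chops."""
--     count, rest = 0, items
--     while rest:
--         rest = _strip_box(rest, w)
--         count += 1
--     return count
--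
--
-- def min_weight_for_boxes(items, k):
--     def search(lo, hi):
--         if lo >= hi:
--             return lo
--         mid = (lo + hi) // 2
--         if _boxes_needed(items, mid) <= k:
--             return search(lo, mid)
--         return search(mid + 1, hi)
--
--     return search(max(items), sum(items))
-- ===== Notes on version B (the rewrite author's own statement) =====
-- stated objective: alternative
-- what changed: B keeps A's bisection probe-for-probe (forced: with negative items the greedy feasibility test is not monotone in the capacity, so the probe sequence determines the answer) but restructures both halves: feasibility is computed by repeatedly chopping the first maximal greedy box off the list and comparing the chop count with k, instead of A's single-pass item loop with a box counter and early abort, and the search is a recursive function instead of a while-loop; Pre_ excludes only the empty list, on which A raises ValueError (max([])).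
import Mathlib
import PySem

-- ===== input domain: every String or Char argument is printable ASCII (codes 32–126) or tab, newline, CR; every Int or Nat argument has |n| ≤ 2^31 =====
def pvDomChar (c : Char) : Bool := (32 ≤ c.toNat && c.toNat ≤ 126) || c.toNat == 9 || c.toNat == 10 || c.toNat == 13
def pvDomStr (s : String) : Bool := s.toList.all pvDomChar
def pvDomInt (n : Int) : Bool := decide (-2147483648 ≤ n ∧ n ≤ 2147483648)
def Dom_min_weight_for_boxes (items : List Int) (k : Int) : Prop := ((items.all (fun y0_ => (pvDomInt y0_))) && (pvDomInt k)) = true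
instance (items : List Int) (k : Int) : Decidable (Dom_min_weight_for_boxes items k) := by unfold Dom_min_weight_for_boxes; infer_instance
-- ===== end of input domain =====

-- B keeps A's bisection probe-for-probe (with negative items the greedy test is not
-- monotone, so the probe sequence determines the answer) but replaces both inner
-- computations: the feasibility test repeatedly chops the first maximal box off the
-- list and compares the chop count with k (vs A's one-pass counter with early abort),
-- and the search is recursive (objective: alternative; same asymptotic cost).

-- ===== PORT A =====
-- can_pack's for-loop over items, state (current_weight, boxes_used), early False.
def pvCanPackGo (maxW k : Int) : List Int → Int → Int → Bool
  | [], _cur, _boxes => true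
  | item :: rest, cur, boxes =>
    if cur + item > maxW then
      if boxes + 1 > k then false
      else pvCanPackGo maxW k rest item (boxes + 1)
    else pvCanPackGo maxW k rest (cur + item) boxes

def pvCanPack (items : List Int) (maxW k : Int) : Bool :=
  pvCanPackGo maxW k items 0 1

-- the while left < right loop of A's binary search
def pvBisectA (items : List Int) (k left right : Int) : Int :=
  if _h : left < right then
    let mid := PySem.Int.floordiv (left + right) 2
    if pvCanPack items mid k then pvBisectA items k left mid
    else pvBisectA items k (mid + 1) right
  else left
termination_by (right - left).toNat
decreasing_by
  · have _h2 : PySem.Int.floordiv (left + right) 2 < right :=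
      (PySem.Int.floordiv_lt_iff_lt_mul (by norm_num)).mpr (by omega)
    have _h1 := (PySem.Int.floordiv_two_mid_bounds (le_of_lt _h)).1
    omega
  · have _h2 : PySem.Int.floordiv (left + right) 2 < right :=
      (PySem.Int.floordiv_lt_iff_lt_mul (by norm_num)).mpr (by omega)
    have _h1 := (PySem.Int.floordiv_two_mid_bounds (le_of_lt _h)).1
    omega

def min_weight_for_boxes (items : List Int) (k : Int) : Int :=
  match PySem.List.max? items id with
  | none => 0  -- max([]) raises ValueError in Python; excluded by Pre_
  | some left => pvBisectA items k left items.sum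

-- ===== PORT B =====
-- _strip_box's while-loop over the tail, state total
def pvStripGo (w : Int) : List Int → Int → List Int
  | [], _total => []
  | y :: ys, total => if total + y ≤ w then pvStripGo w ys (total + y) else y :: ys

-- needed by pvBoxesNeeded's termination proof below
theorem pvStripGo_length_le (w : Int) : ∀ (ys : List Int) (t : Int), (pvStripGo w ys t).length ≤ ys.length := by
  intro ys
  induction ys with
  | nil => intro t; simp [pvStripGo]
  | cons y ys ih =>
    intro t
    simp only [pvStripGo]
    split
    · exact le_trans (ih (t + y)) (by simp)
    · simp

-- _boxes_needed's while rest: loop, counting chops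
def pvBoxesNeeded (w : Int) : List Int → Int
  | [] => 0
  | x :: rest => pvBoxesNeeded w (pvStripGo w rest x) + 1
termination_by xs => xs.length
decreasing_by
  exact Nat.lt_succ_of_le (pvStripGo_length_le w rest x)

-- B's recursive search(lo, hi)
def pvBisectB (items : List Int) (k lo hi : Int) : Int :=
  if _h : lo ≥ hi then lo
  else
    let mid := PySem.Int.floordiv (lo + hi) 2
    if pvBoxesNeeded mid items ≤ k then pvBisectB items k lo mid
    else pvBisectB items k (mid + 1) hi
termination_by (hi - lo).toNat
decreasing_by
  · have _h2 : PySem.Int.floordiv (lo + hi) 2 < hi :=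
      (PySem.Int.floordiv_lt_iff_lt_mul (by norm_num)).mpr (by omega)
    have _h1 := (PySem.Int.floordiv_two_mid_bounds (by omega : lo ≤ hi)).1
    omega
  · have _h2 : PySem.Int.floordiv (lo + hi) 2 < hi :=
      (PySem.Int.floordiv_lt_iff_lt_mul (by norm_num)).mpr (by omega)
    have _h1 := (PySem.Int.floordiv_two_mid_bounds (by omega : lo ≤ hi)).1
    omega

def min_weight_for_boxes_alt (items : List Int) (k : Int) : Int :=
  match PySem.List.max? items id with
  | none => 0  -- max([]) raises ValueError in Python; excluded by Pre_
  | some lo => pvBisectB items k lo items.sum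

-- ===== PRECONDITION & SPEC =====
-- Pre_ excludes only the empty list, on which Python A raises ValueError (max([])).
def Pre_min_weight_for_boxes (items : List Int) (k : Int) : Prop := items ≠ []
instance (items : List Int) (k : Int) : Decidable (Pre_min_weight_for_boxes items k) := by unfold Pre_min_weight_for_boxes; infer_instance
def pvWitness_min_weight_for_boxes : List Int × Int := ([2, 3, 4], 2)

def Spec_min_weight_for_boxes (items : List Int) (k : Int) (out : Int) : Prop := out = min_weight_for_boxes_alt items k
instance (items : List Int) (k : Int) (out : Int) : Decidable (Spec_min_weight_for_boxes items k out) := by unfold Spec_min_weight_for_boxes; infer_instance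

-- ===== CLAIM (what is proved, stated in full; the proofs are below) =====
def Claim_equal_min_weight_for_boxes : Prop := ∀ (items : List Int) (k : Int), Dom_min_weight_for_boxes items k → Pre_min_weight_for_boxes items k → Spec_min_weight_for_boxes items k (min_weight_for_boxes items k)

-- ===== LEMMAS AND PROOFS =====

theorem pvBoxesNeeded_nonneg (w : Int) (xs : List Int) : 0 ≤ pvBoxesNeeded w xs := by
  induction xs using pvBoxesNeeded.induct w with
  | case1 => simp [pvBoxesNeeded]
  | case2 x rest ih => rw [pvBoxesNeeded]; omega

-- the greedy scan from state (cur, boxes) answers: no further box is opened, or the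
-- final box count stays ≤ k — phrased through B's chop-counting of the remainder.
theorem pvCanPackGo_eq (w k : Int) :
    ∀ (ys : List Int) (cur b : Int),
      pvCanPackGo w k ys cur b =
        (decide (pvBoxesNeeded w (pvStripGo w ys cur) = 0) ||
         decide (b + pvBoxesNeeded w (pvStripGo w ys cur) ≤ k)) := by
  intro ys
  induction ys with
  | nil => intro cur b; simp [pvCanPackGo, pvStripGo, pvBoxesNeeded]
  | cons y ys ih =>
    intro cur b
    by_cases hy : cur + y > w
    · have hstrip : pvStripGo w (y :: ys) cur = y :: ys := by
        simp [pvStripGo]; omega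
      have hR := pvBoxesNeeded_nonneg w (pvStripGo w ys y)
      rw [hstrip, pvBoxesNeeded]
      by_cases hk : b + 1 > k
      · rw [show pvCanPackGo w k (y :: ys) cur b = false by
            simp only [pvCanPackGo, if_pos hy, if_pos hk]]
        rw [decide_eq_false (by omega : ¬ (pvBoxesNeeded w (pvStripGo w ys y) + 1 = 0)),
            decide_eq_false (by omega : ¬ (b + (pvBoxesNeeded w (pvStripGo w ys y) + 1) ≤ k))]
        rfl
      · simp only [pvCanPackGo, if_pos hy, if_neg hk]
        rw [ih y (b + 1)]
        apply Bool.eq_iff_iff.mpr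
        simp only [Bool.or_eq_true, decide_eq_true_eq]
        constructor
        · rintro (h0 | hle) <;> omega
        · intro h; right; omega
    · have hstrip : pvStripGo w (y :: ys) cur = pvStripGo w ys (cur + y) := by
        simp [pvStripGo]; omega
      simp only [pvCanPackGo, if_neg hy]
      rw [hstrip, ih (cur + y) b]

-- a fully stripped tail means the running total absorbed everything within w
theorem pvStripGo_nil_sum (w : Int) :
    ∀ (ys : List Int) (t : Int), t ≤ w → pvStripGo w ys t = [] → t + ys.sum ≤ w := by
  intro ys
  induction ys with
  | nil => intro t ht _; simpa using ht
  | cons y ys ih =>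
    intro t ht h
    simp only [pvStripGo] at h
    split at h
    · have := ih (t + y) (by omega) h
      simp [List.sum_cons]; omega
    · exact absurd h (by simp)

theorem pvBoxesNeeded_eq_zero_iff (w : Int) (xs : List Int) :
    pvBoxesNeeded w xs = 0 ↔ xs = [] := by
  cases xs with
  | nil => simp [pvBoxesNeeded]
  | cons x rest =>
    rw [pvBoxesNeeded]
    have := pvBoxesNeeded_nonneg w (pvStripGo w rest x)
    constructor
    · intro h; omega
    · intro h; exact absurd h (by simp)

-- for k ≥ 1, A's feasibility test equals "B's greedy box count fits in k boxes"
-- (at any capacity at least every single item)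
theorem pvCanPack_iff (items : List Int) (w k : Int)
    (hk : 1 ≤ k) (hne : items ≠ []) (hw : ∀ x ∈ items, x ≤ w) :
    pvCanPack items w k = decide (pvBoxesNeeded w items ≤ k) := by
  obtain ⟨x, rest, rfl⟩ := List.exists_cons_of_ne_nil hne
  have hx : x ≤ w := hw x (by simp)
  have hfirst : pvCanPack (x :: rest) w k = pvCanPackGo w k rest x 1 := by
    simp [pvCanPack, pvCanPackGo]; omega
  rw [hfirst, pvCanPackGo_eq w k rest x 1, pvBoxesNeeded]
  have hR := pvBoxesNeeded_nonneg w (pvStripGo w rest x)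
  apply Bool.eq_iff_iff.mpr
  simp only [Bool.or_eq_true, decide_eq_true_eq]
  constructor
  · rintro (h0 | hle) <;> omega
  · intro h
    rcases (show pvBoxesNeeded w (pvStripGo w rest x) ≤ 0 ∨ 0 < pvBoxesNeeded w (pvStripGo w rest x) by omega) with h0 | h1
    · left; omega
    · right; omega

-- for k ≤ 0, A's test fails at any capacity below the total: a pass would mean the
-- whole list fits in the first box, forcing sum ≤ w
theorem pvCanPack_false_of_k_nonpos (items : List Int) (w k : Int)
    (hk : k ≤ 0) (hne : items ≠ []) (hw : w < items.sum) :
    pvCanPack items w k = false := by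
  obtain ⟨x, rest, rfl⟩ := List.exists_cons_of_ne_nil hne
  by_cases hx : x ≤ w
  · have hfirst : pvCanPack (x :: rest) w k = pvCanPackGo w k rest x 1 := by
      simp [pvCanPack, pvCanPackGo]; omega
    rw [hfirst, pvCanPackGo_eq w k rest x 1]
    have hR := pvBoxesNeeded_nonneg w (pvStripGo w rest x)
    rw [decide_eq_false, decide_eq_false (by omega), Bool.or_false]
    intro h0
    have hnil := (pvBoxesNeeded_eq_zero_iff w _).mp h0
    have := pvStripGo_nil_sum w rest x hx hnil
    simp [List.sum_cons] at hw
    omega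
  · simp only [pvCanPack, pvCanPackGo]
    rw [if_pos (by omega : (0 : Int) + x > w), if_pos (by omega : (1 : Int) + 1 > k)]

-- k ≥ 1: the two bisections probe the same midpoints and agree branch by branch
theorem pvBisect_eq_pos (items : List Int) (k : Int) (hk : 1 ≤ k) (hne : items ≠ []) :
    ∀ (n : Nat) (lo hi : Int), (hi - lo).toNat = n → (∀ x ∈ items, x ≤ lo) →
      pvBisectA items k lo hi = pvBisectB items k lo hi := by
  intro n
  induction n using Nat.strong_induction_on with
  | _ n ih =>
    intro lo hi hn hlo
    by_cases h : lo < hi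
    · have hmid := PySem.Int.floordiv_two_mid_bounds (le_of_lt h)
      have hmid2 : PySem.Int.floordiv (lo + hi) 2 < hi :=
        (PySem.Int.floordiv_lt_iff_lt_mul (by norm_num)).mpr (by omega)
      rw [pvBisectA, dif_pos h, pvBisectB, dif_neg (by omega)]
      simp only
      rw [pvCanPack_iff items _ k hk hne
        (fun x hx => le_trans (hlo x hx) hmid.1)]
      by_cases hc : pvBoxesNeeded (PySem.Int.floordiv (lo + hi) 2) items ≤ k
      · rw [if_pos (by simpa using hc), if_pos hc]
        exact ih ((PySem.Int.floordiv (lo + hi) 2) - lo).toNat (by omega) lo _ rfl hlo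
      · rw [if_neg (by simpa using hc), if_neg hc]
        exact ih (hi - (PySem.Int.floordiv (lo + hi) 2 + 1)).toNat (by omega) _ hi rfl
          (fun x hx => le_trans (hlo x hx) (by omega))
    · rw [pvBisectA, dif_neg h, pvBisectB, dif_pos (by omega)]

-- k ≤ 0: every probed mid is below hi ≤ sum, so both tests fail at every probe
-- (A's by pvCanPack_false_of_k_nonpos, B's because the box count is at least 1)
theorem pvBisect_eq_nonpos (items : List Int) (k : Int) (hk : k ≤ 0) (hne : items ≠ []) :
    ∀ (n : Nat) (lo hi : Int), (hi - lo).toNat = n → hi ≤ items.sum →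
      pvBisectA items k lo hi = pvBisectB items k lo hi := by
  intro n
  induction n using Nat.strong_induction_on with
  | _ n ih =>
    intro lo hi hn hhi
    by_cases h : lo < hi
    · have hmid := PySem.Int.floordiv_two_mid_bounds (le_of_lt h)
      have hmid2 : PySem.Int.floordiv (lo + hi) 2 < hi :=
        (PySem.Int.floordiv_lt_iff_lt_mul (by norm_num)).mpr (by omega)
      rw [pvBisectA, dif_pos h, pvBisectB, dif_neg (by omega)]
      simp only
      have hB : ¬ pvBoxesNeeded (PySem.Int.floordiv (lo + hi) 2) items ≤ k := by
        obtain ⟨x, rest, rfl⟩ := List.exists_cons_of_ne_nil hne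
        rw [pvBoxesNeeded]
        have := pvBoxesNeeded_nonneg (PySem.Int.floordiv (lo + hi) 2) (pvStripGo (PySem.Int.floordiv (lo + hi) 2) rest x)
        omega
      rw [pvCanPack_false_of_k_nonpos items _ k hk hne (by omega), if_neg hB]
      simp only [Bool.false_eq_true, if_false]
      exact ih (hi - (PySem.Int.floordiv (lo + hi) 2 + 1)).toNat (by omega) _ hi rfl hhi
    · rw [pvBisectA, dif_neg h, pvBisectB, dif_pos (by omega)]

-- ===== VERDICT (by name: the statement is the Claim_ definition above) =====
theorem min_weight_for_boxes_spec : Claim_equal_min_weight_for_boxes := by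
  intro items k _dom hpre
  unfold Spec_min_weight_for_boxes min_weight_for_boxes min_weight_for_boxes_alt
  cases hm : PySem.List.max? items id with
  | none => exact absurd ((PySem.List.max?_eq_none_iff items id).mp hm) hpre
  | some m =>
    simp only
    by_cases hk : 1 ≤ k
    · exact pvBisect_eq_pos items k hk hpre _ m items.sum rfl
        (fun x hx => PySem.List.max?_isMax hm x hx)
    · exact pvBisect_eq_nonpos items k (by omega) hpre _ m items.sum rfl le_rfl
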